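-- pv_equiv track=rewrite | github.com/zheng-run/zheng-run.github.io | _data/download/dim.py | q_adic_expansion
-- ===== SOURCE A (Python) =====
-- def q_adic_expansion(delta_minus_1, q, max_length):
--     """
--     Compute the q-adic expansion of delta - 1, padded with zeros to max_length.
--     Returns a list where the i-th element is delta_i.
--     """
--     expansion = []
--     temp = delta_minus_1
--     while temp > 0:
--         expansion.append(temp % q)
--         temp = temp // q
--     # Pad with zeros to reach max_length
--     while len(expansion) < max_length:
--         expansion.append(0)
--     return expansion
-- ===== SOURCE B (Python) =====
-- def q_adic_expansion(delta_minus_1, q, max_length):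
--     """
--     Compute the q-adic expansion of delta - 1, padded with zeros to max_length.
--     Positional form: find the number of significant base-q digits d, then read
--     each digit directly as (delta_minus_1 // q**i) % q over max(d, max_length)
--     positions; high positions are zero and provide the padding.
--     """
--     if delta_minus_1 <= 0:
--         return [0] * max(0, max_length)
--     d = 1
--     p = q
--     while p <= delta_minus_1:
--         d += 1
--         p *= q
--     return [(delta_minus_1 // q ** i) % q for i in range(max(d, max_length))]
-- ===== Notes on version B (the rewrite author's own statement) =====
-- stated objective: alternative
-- what changed: Replaces the divide-down state-threading loop plus separate zero-padding loop by first counting the significant base-q digits d via powers of q and then reading every position of the result directly in one comprehension [(delta_minus_1 // q**i) % q for i in range(max(d, max_length))], where high positions are naturally zero.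
-- outside the precondition, e.g. on q_adic_expansion(5, -3, 2): A returns [-1, 0], B returns [-1, -2]; on q_adic_expansion(5, 0, 2): A raises ZeroDivisionError, B does not finish within the time limit
import Mathlib
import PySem

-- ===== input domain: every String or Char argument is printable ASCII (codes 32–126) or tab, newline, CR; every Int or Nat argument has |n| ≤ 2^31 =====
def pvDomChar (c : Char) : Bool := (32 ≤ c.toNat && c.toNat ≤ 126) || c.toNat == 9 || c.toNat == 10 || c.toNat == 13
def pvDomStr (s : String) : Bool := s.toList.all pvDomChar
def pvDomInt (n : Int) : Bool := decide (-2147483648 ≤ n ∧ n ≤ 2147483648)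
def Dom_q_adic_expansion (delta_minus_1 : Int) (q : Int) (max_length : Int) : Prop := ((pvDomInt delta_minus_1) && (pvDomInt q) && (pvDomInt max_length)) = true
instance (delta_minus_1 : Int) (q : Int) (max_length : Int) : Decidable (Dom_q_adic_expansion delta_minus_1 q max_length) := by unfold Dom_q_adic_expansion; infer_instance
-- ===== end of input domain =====

-- B reads each digit of the result positionally in one comprehension instead of threading a
-- divide-down state plus a separate padding loop (objective: alternative decomposition).

-- ===== PORT A =====
-- 'while temp > 0: expansion.append(temp % q); temp = temp // q'.
-- The extra '2 ≤ q' conjunct only makes the recursion total (it holds on all of Pre_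
-- whenever the loop body runs); it does not change the computed value there.
def pvLoopA (q : Int) (temp : Int) : List Int :=
  if h : 0 < temp ∧ 2 ≤ q then
    PySem.Int.mod temp q :: pvLoopA q (PySem.Int.floordiv temp q)
  else []
termination_by temp.toNat
decreasing_by
  have h2 : PySem.Int.floordiv temp q < temp :=
    (PySem.Int.floordiv_lt_iff_lt_mul (by omega)).mpr (by nlinarith [h.1, h.2])
  have h3 : (0:Int) ≤ PySem.Int.floordiv temp q :=
    (PySem.Int.le_floordiv_iff_mul_le (by omega)).mpr (by nlinarith [h.1])
  omega

-- 'while len(expansion) < max_length: expansion.append(0)'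
def pvPadA (max_length : Int) (expansion : List Int) : List Int :=
  if (expansion.length : Int) < max_length then pvPadA max_length (expansion ++ [0])
  else expansion
termination_by (max_length - expansion.length).toNat
decreasing_by simp only [List.length_append, List.length_cons, List.length_nil]; omega

def q_adic_expansion (delta_minus_1 : Int) (q : Int) (max_length : Int) : List Int :=
  pvPadA max_length (pvLoopA q delta_minus_1)

-- ===== PORT B =====
-- 'd = 1; p = q; while p <= delta_minus_1: d += 1; p *= q'.
-- The extra '2 ≤ q ∧ 1 ≤ p' conjuncts only make the recursion total (they hold on all of
-- Pre_ with delta_minus_1 > 0); they do not change the computed value there.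
def pvDigCount (n : Int) (q : Int) (d : Int) (p : Int) : Int :=
  if h : p ≤ n ∧ 2 ≤ q ∧ 1 ≤ p then pvDigCount n q (d + 1) (p * q) else d
termination_by (n + 1 - p).toNat
decreasing_by
  have h1 : p + 1 ≤ p * q := by nlinarith [h.1, h.2.1, h.2.2]
  omega

def q_adic_expansion_alt (delta_minus_1 : Int) (q : Int) (max_length : Int) : List Int :=
  if delta_minus_1 ≤ 0 then List.replicate (max 0 max_length).toNat 0
  else
    let d := pvDigCount delta_minus_1 q 1 q
    (PySem.List.pyRange 0 (max d max_length) 1).map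
      (fun i => PySem.Int.mod (PySem.Int.floordiv delta_minus_1 (q ^ i.toNat)) q)

-- ===== PRECONDITION & SPEC =====
-- Pre_ restricts to the natural domain of a q-adic expansion: base q ≥ 2 (or a non-positive
-- delta_minus_1, where the digit loop never runs). For delta_minus_1 > 0 it excludes q = 0
-- (A raises ZeroDivisionError), q = 1 (A loops forever), and q < 0, where A returns a single
-- floor-mod digit that is not a base-q expansion and B's positional formula differs (see cites).
def Pre_q_adic_expansion (delta_minus_1 : Int) (q : Int) (max_length : Int) : Prop :=
  delta_minus_1 ≤ 0 ∨ 2 ≤ q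
instance (delta_minus_1 : Int) (q : Int) (max_length : Int) : Decidable (Pre_q_adic_expansion delta_minus_1 q max_length) := by unfold Pre_q_adic_expansion; infer_instance

def pvWitness_q_adic_expansion : Int × Int × Int := (10, 3, 5)

def Spec_q_adic_expansion (delta_minus_1 : Int) (q : Int) (max_length : Int) (out : List Int) : Prop := out = q_adic_expansion_alt delta_minus_1 q max_length
instance (delta_minus_1 : Int) (q : Int) (max_length : Int) (out : List Int) : Decidable (Spec_q_adic_expansion delta_minus_1 q max_length out) := by unfold Spec_q_adic_expansion; infer_instance

-- ===== CLAIM (what is proved, stated in full; the proofs are below) =====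
def Claim_equal_q_adic_expansion : Prop := ∀ (delta_minus_1 : Int) (q : Int) (max_length : Int), Dom_q_adic_expansion delta_minus_1 q max_length → Pre_q_adic_expansion delta_minus_1 q max_length → Spec_q_adic_expansion delta_minus_1 q max_length (q_adic_expansion delta_minus_1 q max_length)

-- ===== LEMMAS AND PROOFS =====

-- A's padding loop appends exactly (max_length - len)⁺ zeros
theorem pvPadA_eq (max_length : Int) (e : List Int) :
    pvPadA max_length e = e ++ List.replicate (max_length - e.length).toNat 0 := by
  fun_induction pvPadA with
  | case1 e h ih =>
    rw [ih]
    simp only [List.length_append, List.length_cons, List.length_nil, List.append_assoc]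
    have : ((max_length : Int) - e.length).toNat = (max_length - ((e.length : Int) + 0 + 1)).toNat + 1 := by
      omega
    rw [this, List.replicate_succ]
    simp
  | case2 e h =>
    have : ((max_length : Int) - e.length).toNat = 0 := by omega
    simp [this]

-- digit-count step: one multiplication on the accumulator side is one division on n's side
theorem pvDigCount_step (q : Int) (hq : 2 ≤ q) :
    ∀ (m : Nat) (n d p : Int), 1 ≤ p → (n + 1 - p).toNat ≤ m →
      pvDigCount n q (d + 1) (p * q) = 1 + pvDigCount (n / q) q d p := by
  intro m
  induction m with
  | zero =>
    intro n d p hp hm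
    have hpn : ¬ p ≤ n := by omega
    have hpq : ¬ p * q ≤ n := fun hc => hpn (le_trans (by nlinarith) hc)
    have hiff : p ≤ n / q ↔ p * q ≤ n := Int.le_ediv_iff_mul_le (by omega)
    have hL : pvDigCount n q (d + 1) (p * q) = d + 1 := by
      rw [pvDigCount]; exact dif_neg (fun hc => hpq hc.1)
    have hR : pvDigCount (n / q) q d p = d := by
      rw [pvDigCount]; exact dif_neg (fun hc => hpq (hiff.mp hc.1))
    rw [hL, hR]
    omega
  | succ m ih =>
    intro n d p hp hm
    have hiff : p ≤ n / q ↔ p * q ≤ n := Int.le_ediv_iff_mul_le (by omega)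
    have hpq1 : p + 1 ≤ p * q := by nlinarith
    by_cases hg : p * q ≤ n
    · have hL : pvDigCount n q (d + 1) (p * q) = pvDigCount n q (d + 1 + 1) (p * q * q) := by
        rw [pvDigCount]; exact dif_pos ⟨hg, hq, by omega⟩
      have hR : pvDigCount (n / q) q d p = pvDigCount (n / q) q (d + 1) (p * q) := by
        rw [pvDigCount]; exact dif_pos ⟨hiff.mpr hg, hq, hp⟩
      rw [hL, hR]
      exact ih n (d + 1) (p * q) (by omega) (by omega)
    · have hL : pvDigCount n q (d + 1) (p * q) = d + 1 := by
        rw [pvDigCount]; exact dif_neg (fun hc => hg hc.1)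
      have hR : pvDigCount (n / q) q d p = d := by
        rw [pvDigCount]; exact dif_neg (fun hc => hg (hiff.mp hc.1))
      rw [hL, hR]
      omega

theorem pvDigCount_low (n q : Int) (hq : 2 ≤ q) (h1 : 0 < n) (h2 : n < q) :
    pvDigCount n q 1 q = 1 := by
  rw [pvDigCount, dif_neg (by omega)]

theorem pvDigCount_high (n q : Int) (hq : 2 ≤ q) (h : q ≤ n) :
    pvDigCount n q 1 q = 1 + pvDigCount (n / q) q 1 q := by
  have h1 : pvDigCount n q 1 q = pvDigCount n q (0 + 1) (1 * q) := by norm_num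
  rw [h1, pvDigCount_step q hq (n + 1 - 1).toNat n 0 1 le_rfl le_rfl]
  congr 1
  have hnq : (1:Int) ≤ n / q := (Int.le_ediv_iff_mul_le (by omega)).mpr (by omega)
  rw [pvDigCount, dif_pos ⟨hnq, hq, le_rfl⟩]
  norm_num

theorem pvDigCount_ge (n q d p : Int) : d ≤ pvDigCount n q d p := by
  fun_induction pvDigCount with
  | case1 x1 x2 x3 ih => omega
  | case2 x1 x2 x3 => omega

-- proof-only reference form of B's comprehension
def pvBDigits (n q : Int) (K : Nat) : List Int :=
  (List.range K).map (fun k => PySem.Int.mod (PySem.Int.floordiv n (q ^ k)) q)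

theorem pvAlt_eq_bDigits (n q L : Int) (hn : 0 < n) :
    q_adic_expansion_alt n q L = pvBDigits n q (max (pvDigCount n q 1 q) L).toNat := by
  have hcal : q_adic_expansion_alt n q L =
      (PySem.List.pyRange 0 (max (pvDigCount n q 1 q) L) 1).map
        (fun i => PySem.Int.mod (PySem.Int.floordiv n (q ^ i.toNat)) q) := by
    unfold q_adic_expansion_alt
    rw [if_neg (by omega)]
  rw [hcal, PySem.List.pyRange_one, List.map_map]
  unfold pvBDigits
  simp only [sub_zero]
  apply List.map_congr_left
  intro k _
  simp

theorem pvBDigits_shift (n q : Int) (hq : 2 ≤ q) (K : Nat) :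
    pvBDigits n q (K + 1) = PySem.Int.mod n q :: pvBDigits (n / q) q K := by
  unfold pvBDigits
  rw [List.range_succ_eq_map, List.map_cons, List.map_map]
  congr 1
  · rw [pow_zero, PySem.Int.floordiv_eq_ediv_of_pos one_pos, Int.ediv_one]
  · apply List.map_congr_left
    intro k _
    have h1 : (0:Int) < q ^ k := by positivity
    have h2 : (0:Int) < q ^ (k + 1) := by positivity
    simp only [Function.comp_apply, Nat.succ_eq_add_one]
    rw [PySem.Int.floordiv_eq_ediv_of_pos h2, PySem.Int.floordiv_eq_ediv_of_pos h1,
      Int.ediv_ediv_of_nonneg (by omega), ← pow_succ']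

theorem pvBDigits_zero (q : Int) (hq : 2 ≤ q) (K : Nat) :
    pvBDigits 0 q K = List.replicate K 0 := by
  unfold pvBDigits
  have hz : ∀ k ∈ List.range K, PySem.Int.mod (PySem.Int.floordiv 0 (q ^ k)) q = (fun _ : Nat => (0:Int)) k := by
    intro k _
    have h1 : (0:Int) < q ^ k := by positivity
    rw [PySem.Int.floordiv_eq_ediv_of_pos h1, Int.zero_ediv,
      PySem.Int.mod_eq_emod_of_pos (by omega), Int.zero_emod]
  rw [List.map_congr_left hz]
  simp [List.map_const']

theorem pv_nonpos (n q L : Int) (hn : n ≤ 0) :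
    q_adic_expansion n q L = q_adic_expansion_alt n q L := by
  unfold q_adic_expansion q_adic_expansion_alt
  rw [pvLoopA, dif_neg (by omega), if_pos hn, pvPadA_eq]
  simp only [List.nil_append, List.length_nil]
  congr 1
  omega

theorem pv_main (q : Int) (hq : 2 ≤ q) :
    ∀ (m : Nat) (n L : Int), n.toNat ≤ m →
      q_adic_expansion n q L = q_adic_expansion_alt n q L := by
  intro m
  induction m with
  | zero =>
    intro n L _
    exact pv_nonpos n q L (by omega)
  | succ m ih =>
    intro n L hm
    by_cases hn : n ≤ 0
    · exact pv_nonpos n q L hn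
    · push_neg at hn
      have hfd : PySem.Int.floordiv n q = n / q := PySem.Int.floordiv_eq_ediv_of_pos (by omega)
      have hdiv0 : (0:Int) ≤ n / q := Int.ediv_nonneg (by omega) (by omega)
      have hlt : n / q < n := by
        by_contra hcon
        push_neg at hcon
        have := (Int.le_ediv_iff_mul_le (by omega : (0:Int) < q)).mp hcon
        nlinarith
      unfold q_adic_expansion
      rw [pvLoopA, dif_pos ⟨hn, hq⟩, hfd, pvPadA_eq, pvAlt_eq_bDigits n q L hn]
      by_cases hnq : q ≤ n
      · have hd : pvDigCount n q 1 q = 1 + pvDigCount (n / q) q 1 q :=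
          pvDigCount_high n q hq hnq
        have hd1 : 1 ≤ pvDigCount (n / q) q 1 q := pvDigCount_ge _ _ _ _
        have hmax : (max (pvDigCount n q 1 q) L).toNat
            = (max (pvDigCount (n / q) q 1 q) (L - 1)).toNat + 1 := by
          rw [hd]; omega
        have hq0 : 0 < n / q := (Int.le_ediv_iff_mul_le (by omega)).mpr (by omega)
        rw [hmax, pvBDigits_shift n q hq, ← pvAlt_eq_bDigits (n / q) q (L - 1) hq0,
          ← ih (n / q) (L - 1) (by omega),
          show q_adic_expansion (n / q) q (L - 1)
              = pvLoopA q (n / q) ++ List.replicate ((L - 1) - (pvLoopA q (n / q)).length).toNat 0 from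
            by unfold q_adic_expansion; rw [pvPadA_eq]]
        simp only [List.cons_append, List.length_cons]
        congr 3
        omega
      · push_neg at hnq
        have hd : pvDigCount n q 1 q = 1 := pvDigCount_low n q hq hn hnq
        have hz : n / q = 0 := Int.ediv_eq_zero_of_lt (by omega) hnq
        have hmax : (max (pvDigCount n q 1 q) L).toNat = (max 0 (L - 1)).toNat + 1 := by
          rw [hd]; omega
        rw [hmax, pvBDigits_shift n q hq, hz, pvBDigits_zero q hq,
          show pvLoopA q 0 = [] from by rw [pvLoopA]; exact dif_neg (by omega)]
        simp only [List.cons_append, List.nil_append, List.length_cons, List.length_nil]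
        congr 2
        omega

-- ===== VERDICT (by name: the statement is the Claim_ definition above) =====
theorem q_adic_expansion_spec : Claim_equal_q_adic_expansion := by
  intro n q L _ hpre
  unfold Spec_q_adic_expansion
  by_cases hq : 2 ≤ q
  · exact pv_main q hq n.toNat n L le_rfl
  · have hn : n ≤ 0 := by
      rcases hpre with h | h
      · exact h
      · omega
    exact pv_nonpos n q L hn
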